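-- pv_equiv track=rewrite | github.com/dozybot001/maars | backend/planner/index.py | _get_ancestor_path
-- ===== SOURCE A (Python) =====
-- def _get_parent_id(task_id: str) -> str:
--     """Get parent task_id. E.g. '1_2' -> '1', '1' -> '0'."""
--     if "_" in task_id:
--         return task_id.rsplit("_", 1)[0]
--     return "0"
--
-- def _get_ancestor_path(task_id: str) -> str:
--     """Build ancestor path string, e.g. '1_2' -> '0 → 1 → 1_2'."""
--     if not task_id:
--         return ""
--     parts = []
--     curr = task_id
--     while True:
--         parts.insert(0, curr)
--         if curr == "0":
--             break
--         curr = _get_parent_id(curr)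
--     return " → ".join(parts)
-- ===== SOURCE B (Python) =====
-- def _get_ancestor_path(task_id: str) -> str:
--     if not task_id:
--         return ""
--     segs = task_id.split("_")
--     parts = ["_".join(segs[:i + 1]) for i in range(len(segs))]
--     if segs[0] != "0":
--         parts = ["0"] + parts
--     return " → ".join(parts)
-- ===== Notes on version B (the rewrite author's own statement) =====
-- stated objective: simpler
-- what changed: Replaces the upward while-loop of repeated rsplit calls with parts.insert(0,...) by a single forward pass: split once on '_' and join cumulative prefixes, prepending the '0' root only when the first segment is not already '0'.
import Mathlib
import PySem

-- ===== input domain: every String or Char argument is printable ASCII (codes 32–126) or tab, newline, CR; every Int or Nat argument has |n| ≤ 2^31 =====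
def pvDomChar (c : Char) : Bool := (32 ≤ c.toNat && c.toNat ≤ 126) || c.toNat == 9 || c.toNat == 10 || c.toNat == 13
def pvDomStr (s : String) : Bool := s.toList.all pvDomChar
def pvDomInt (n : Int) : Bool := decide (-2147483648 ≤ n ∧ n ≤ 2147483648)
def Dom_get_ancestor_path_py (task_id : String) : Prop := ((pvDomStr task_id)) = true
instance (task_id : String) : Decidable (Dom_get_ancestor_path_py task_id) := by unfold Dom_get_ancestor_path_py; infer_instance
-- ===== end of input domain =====

-- ===== PORT A =====
-- B replaces A's upward rsplit walk with one forward split-and-join pass (objective: simpler).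
-- hand port of curr.rsplit("_", 1)[0] (exact when "_" occurs in cs): everything before the last '_'
def rsplitHead (cs : List Char) : List Char :=
  (((cs.reverse).dropWhile (fun c => c != '_')).tail).reverse

-- used by loopA's termination proof
theorem rsplitHead_length_lt (cs : List Char) (h : '_' ∈ cs) :
    (rsplitHead cs).length < cs.length := by
  have hne : (cs.reverse).dropWhile (fun c => c != '_') ≠ [] := by
    intro hnil
    have := (List.dropWhile_eq_nil_iff).mp hnil '_' (List.mem_reverse.mpr h)
    simp at this
  have hle : ((cs.reverse).dropWhile (fun c => c != '_')).length ≤ cs.length := by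
    calc ((cs.reverse).dropWhile (fun c => c != '_')).length
        ≤ (cs.reverse).length := List.length_dropWhile_le _ _
      _ = cs.length := List.length_reverse
  have hpos : 0 < ((cs.reverse).dropWhile (fun c => c != '_')).length :=
    List.length_pos_iff.mpr hne
  simp only [rsplitHead, List.length_reverse, List.length_tail]
  omega

-- port of _get_parent_id
def parentA (cs : List Char) : List Char :=
  if '_' ∈ cs then rsplitHead cs else ['0']

-- port of A's 'while True' loop over (curr, parts)
def loopA (curr : List Char) (parts : List (List Char)) : List (List Char) :=
  if curr = ['0'] then curr :: parts
  else loopA (parentA curr) (curr :: parts)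
termination_by (if curr = ['0'] then 0 else curr.length + 1 : Nat)
decreasing_by
  simp only [if_neg (by assumption)]
  by_cases hu : '_' ∈ curr
  · have := rsplitHead_length_lt curr hu
    simp only [parentA, if_pos hu]
    split <;> omega
  · simp [parentA, if_neg hu]

def get_ancestor_path_py (task_id : String) : String :=
  if task_id = "" then ""
  else String.ofList (PySem.Chars.join " → ".toList (loopA task_id.toList []))

-- ===== PORT B =====
def get_ancestor_path_py_alt (task_id : String) : String :=
  if task_id = "" then ""
  else
    let segs := task_id.toList.splitOn '_'
    let parts := (List.range segs.length).map
      (fun i => PySem.Chars.join ['_'] (segs.take (i + 1)))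
    let parts := if segs.head? = some ['0'] then parts else ['0'] :: parts
    String.ofList (PySem.Chars.join " → ".toList parts)

-- ===== PRECONDITION & SPEC =====
def Spec_get_ancestor_path_py (task_id : String) (out : String) : Prop := out = get_ancestor_path_py_alt task_id
instance (task_id : String) (out : String) : Decidable (Spec_get_ancestor_path_py task_id out) := by unfold Spec_get_ancestor_path_py; infer_instance

-- ===== CLAIM (what is proved, stated in full; the proofs are below) =====
def Claim_equal_get_ancestor_path_py : Prop := ∀ (task_id : String), Dom_get_ancestor_path_py task_id → Spec_get_ancestor_path_py task_id (get_ancestor_path_py task_id)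

-- ===== LEMMAS AND PROOFS =====

-- intercalate over a cons of a nonempty tail
theorem inter_cons (x : List Char) (t : List (List Char)) (ht : t ≠ []) :
    List.intercalate ['_'] (x :: t) = x ++ '_' :: List.intercalate ['_'] t := by
  cases t with
  | nil => exact absurd rfl ht
  | cons b t' => simp [List.intercalate, List.intersperse]

-- intercalate over a snoc of a nonempty front
theorem inter_snoc (t : List (List Char)) (x : List Char) (ht : t ≠ []) :
    List.intercalate ['_'] (t ++ [x]) = List.intercalate ['_'] t ++ '_' :: x := by
  induction t with
  | nil => exact absurd rfl ht
  | cons a t' ih =>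
    cases t' with
    | nil => simp [List.intercalate, List.intersperse]
    | cons b t'' =>
      rw [List.cons_append, inter_cons a (b :: t'' ++ [x]) (by simp),
          inter_cons a (b :: t'') (by simp), ih (by simp)]
      simp

-- the hand-ported rsplit("_",1)[0] drops exactly the last '_'-free piece
theorem parentA_snoc (j x : List Char) (hx : '_' ∉ x) :
    parentA (j ++ '_' :: x) = j := by
  have hmem : '_' ∈ j ++ '_' :: x := by simp
  have hrev : (j ++ '_' :: x).reverse = x.reverse ++ '_' :: j.reverse := by simp
  have hdropx : (x.reverse).dropWhile (fun c => c != '_') = [] := by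
    apply List.dropWhile_eq_nil_iff.mpr
    intro c hc
    have : c ∈ x := List.mem_reverse.mp hc
    simp only [bne_iff_ne, ne_eq]
    intro h; exact hx (h ▸ this)
  simp only [parentA, if_pos hmem, rsplitHead, hrev, List.dropWhile_append, hdropx,
    List.isEmpty_nil, if_true]
  rw [List.dropWhile_cons_of_neg (by simp)]
  simp

-- every chunk of splitOn '_' is '_'-free
theorem splitOn_underscore_free (cs : List Char) :
    ∀ s ∈ cs.splitOn '_', '_' ∉ s := by
  show ∀ s ∈ cs.splitOnP (· == '_'), '_' ∉ s
  induction cs with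
  | nil => simp [List.splitOnP_nil]
  | cons c cs ih =>
    rw [List.splitOnP_cons]
    by_cases hc : c = '_'
    · simp only [hc, beq_self_eq_true, if_true]
      intro s hs
      rcases List.mem_cons.mp hs with h | h
      · subst h; simp
      · exact ih s h
    · rw [if_neg (by simp [hc])]
      rcases hrec : cs.splitOnP (· == '_') with _ | ⟨h0, trest⟩
      · exact absurd hrec (List.splitOnP_ne_nil _ cs)
      · intro s hs
        simp only [List.modifyHead] at hs
        rcases List.mem_cons.mp hs with h | h
        · subst h
          intro hmem
          rcases List.mem_cons.mp hmem with h' | h'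
          · exact hc h'.symm
          · exact ih h0 (hrec ▸ List.mem_cons_self) h'
        · exact ih s (hrec ▸ List.mem_cons_of_mem h0 h)

-- the main loop invariant: A's upward walk over intercalated segments produces
-- exactly B's forward prefix chain (with the optional '0' root), then acc
theorem loopA_inter (l : List (List Char)) :
    ∀ (x : List Char), (∀ s ∈ l, '_' ∉ s) → '_' ∉ x → ∀ (acc : List (List Char)),
    loopA (List.intercalate ['_'] (l ++ [x])) acc =
      ((if (l ++ [x]).head? = some ['0'] then ([] : List (List Char)) else [['0']])
        ++ (List.range (l ++ [x]).length).map
            (fun i => List.intercalate ['_'] ((l ++ [x]).take (i + 1)))) ++ acc := by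
  induction l using List.reverseRecOn with
  | nil =>
    intro x _ hx acc
    have h1 : List.intercalate ['_'] [x] = x := by simp [List.intercalate]
    simp only [List.nil_append, List.head?_cons,
      List.length_singleton, List.range_one, List.map_cons, List.map_nil, List.take_succ_cons,
      List.take_nil, h1]
    by_cases hx0 : x = ['0']
    · rw [loopA]; simp [hx0]
    · rw [loopA, if_neg hx0]
      have hpar : parentA x = ['0'] := by
        simp only [parentA, if_neg hx]
      rw [hpar, loopA]
      simp [hx0]
  | append_singleton m y ih =>
    intro x hm hx acc
    have hmy : m ++ [y] ≠ [] := by simp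
    have hs : List.intercalate ['_'] ((m ++ [y]) ++ [x])
        = List.intercalate ['_'] (m ++ [y]) ++ '_' :: x := inter_snoc _ _ hmy
    have hsne : List.intercalate ['_'] ((m ++ [y]) ++ [x]) ≠ ['0'] := by
      rw [hs]; intro hcontra
      have : '_' ∈ (['0'] : List Char) := by rw [← hcontra]; simp
      simp at this
    rw [loopA, if_neg hsne, hs, parentA_snoc _ _ hx,
        ih y (fun s hsm => hm s (List.mem_append_left _ hsm))
          (hm y (List.mem_append_right _ List.mem_cons_self)) _]
    -- now reshape B's chain: head? is unchanged and one more prefix (the full string) appears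
    have hhead : ((m ++ [y]) ++ [x]).head? = (m ++ [y]).head? := by
      rw [List.head?_append]
      rcases m with _ | ⟨a, m'⟩ <;> simp
    have hlen : ((m ++ [y]) ++ [x]).length = (m ++ [y]).length + 1 := by simp
    have hmap : (List.range ((m ++ [y]) ++ [x]).length).map
          (fun i => List.intercalate ['_'] (((m ++ [y]) ++ [x]).take (i + 1)))
        = (List.range (m ++ [y]).length).map
            (fun i => List.intercalate ['_'] ((m ++ [y]).take (i + 1)))
          ++ [List.intercalate ['_'] ((m ++ [y]) ++ [x])] := by
      rw [hlen, List.range_succ, List.map_append, List.map_singleton]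
      congr 1
      · apply List.map_congr_left
        intro i hi
        have hi' : i + 1 ≤ (m ++ [y]).length := List.mem_range.mp hi
        rw [List.take_append_of_le_length hi']
      · rw [List.take_of_length_le (by simp)]
    rw [hmap, hhead, hs]
    simp [List.append_assoc]


-- ===== VERDICT (by name: the statement is the Claim_ definition above) =====
theorem get_ancestor_path_py_spec : Claim_equal_get_ancestor_path_py := by
  intro task_id _
  unfold Spec_get_ancestor_path_py get_ancestor_path_py get_ancestor_path_py_alt
  by_cases h : task_id = ""
  · simp [h]
  · rw [if_neg h, if_neg h]
    have hne : task_id.toList.splitOn '_' ≠ [] := by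
      show task_id.toList.splitOnP (· == '_') ≠ []
      exact List.splitOnP_ne_nil _ _
    obtain ⟨l, x, hlx⟩ := (List.eq_nil_or_concat (task_id.toList.splitOn '_')).resolve_left hne
    rw [List.concat_eq_append] at hlx
    have hfree := splitOn_underscore_free task_id.toList
    rw [hlx] at hfree
    have hcs : task_id.toList = List.intercalate ['_'] (l ++ [x]) := by
      conv_lhs => rw [← List.intercalate_splitOn (x := '_') (xs := task_id.toList)]
      rw [hlx]
    congr 1
    show PySem.Chars.join _ (loopA task_id.toList []) = _
    rw [hcs, loopA_inter l x (fun s hs => hfree s (List.mem_append_left _ hs))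
        (hfree x (List.mem_append_right _ List.mem_cons_self)) []]
    rw [← hcs, hlx]
    simp only [PySem.Chars.join, List.append_nil]
    split <;> simp
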